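-- pv_equiv track=rewrite | github.com/KevOneRedOne/Lovely-Roasting-Brawler | score.py | ScoreTotal
-- ===== SOURCE A (Python) =====
-- def ScoreTotal(phrase, faiblesse):
--     point = 0
--     for elem in phrase:
--         point += 3
--         for faib in faiblesse:
--             if faib == elem:
--                 point += 2
--     return point
-- ===== SOURCE B (Python) =====
-- def ScoreTotal(phrase, faiblesse):
--     def runs(xs):
--         out = []
--         rest = sorted(xs)
--         while rest:
--             x = rest[0]
--             k = 1
--             while k < len(rest) and rest[k] == x:
--                 k += 1
--             out.append((x, k))
--             rest = rest[k:]
--         return out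
--     rp = runs(phrase)
--     rf = runs(faiblesse)
--     i = j = 0
--     overlap = 0
--     while i < len(rp) and j < len(rf):
--         if rp[i][0] < rf[j][0]:
--             i += 1
--         elif rf[j][0] < rp[i][0]:
--             j += 1
--         else:
--             overlap += rp[i][1] * rf[j][1]
--             i += 1
--             j += 1
--     return 3 * len(phrase) + 2 * overlap
-- ===== Notes on version B (the rewrite author's own statement) =====
-- stated objective: faster
-- what changed: Replaced A's nested per-element rescan of faiblesse with a sort-then-merge algorithm: both lists are sorted and run-length encoded, then a two-pointer merge over the two run lists multiplies matching run multiplicities to get the overlap, and the result is 3*len(phrase) + 2*overlap.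
import Mathlib
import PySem

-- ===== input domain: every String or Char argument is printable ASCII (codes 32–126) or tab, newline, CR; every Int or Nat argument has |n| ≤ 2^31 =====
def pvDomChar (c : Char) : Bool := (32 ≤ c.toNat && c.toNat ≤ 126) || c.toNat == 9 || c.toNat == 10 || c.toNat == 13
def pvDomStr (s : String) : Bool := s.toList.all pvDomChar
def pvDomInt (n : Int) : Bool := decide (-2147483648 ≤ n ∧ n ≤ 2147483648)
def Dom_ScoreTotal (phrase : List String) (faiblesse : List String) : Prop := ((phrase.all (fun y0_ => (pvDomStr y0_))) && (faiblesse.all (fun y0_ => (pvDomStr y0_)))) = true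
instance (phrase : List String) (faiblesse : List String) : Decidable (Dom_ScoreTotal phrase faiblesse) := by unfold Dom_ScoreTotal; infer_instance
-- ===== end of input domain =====

-- B replaces A's nested rescan with sort + run-length encoding of both lists and a
-- two-pointer merge multiplying run multiplicities (asymptotically faster algorithm).


-- ===== PORT A =====
def ScoreTotal (phrase : List String) (faiblesse : List String) : Int :=
  phrase.foldl (fun point elem =>
    faiblesse.foldl (fun p faib => if faib == elem then p + 2 else p) (point + 3)) 0

-- ===== PORT B =====
-- runs(xs): run-length encoding of sorted(xs) — the inner Python while-loop counting
-- equal leading elements is the takeWhile length, rest = rest[k:] is the drop.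
def pvRuns (l : List String) : List (String × Int) :=
  match l with
  | [] => []
  | x :: r =>
    let k := (r.takeWhile (fun y => y == x)).length
    (x, (k : Int) + 1) :: pvRuns (r.drop k)
  termination_by l.length
  decreasing_by
    simp only [List.length_cons, List.length_drop]
    omega

-- the two-pointer merge loop over the two run lists
def pvMerge : List (String × Int) → List (String × Int) → Int
  | [], _ => 0
  | _ :: _, [] => 0
  | (p, a) :: ps, (f, b) :: fs =>
    if p < f then pvMerge ps ((f, b) :: fs)
    else if f < p then pvMerge ((p, a) :: ps) fs
    else a * b + pvMerge ps fs
  termination_by x y => x.length + y.length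

def ScoreTotal_alt (phrase : List String) (faiblesse : List String) : Int :=
  3 * (phrase.length : Int) +
    2 * pvMerge (pvRuns (PySem.List.sorted phrase (fun x => x) false))
                (pvRuns (PySem.List.sorted faiblesse (fun x => x) false))

-- ===== PRECONDITION & SPEC =====
def Spec_ScoreTotal (phrase : List String) (faiblesse : List String) (out : Int) : Prop := out = ScoreTotal_alt phrase faiblesse
instance (phrase : List String) (faiblesse : List String) (out : Int) : Decidable (Spec_ScoreTotal phrase faiblesse out) := by unfold Spec_ScoreTotal; infer_instance

-- ===== CLAIM (what is proved, stated in full; the proofs are below) =====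
def Claim_equal_ScoreTotal : Prop := ∀ (phrase : List String) (faiblesse : List String), Dom_ScoreTotal phrase faiblesse → Spec_ScoreTotal phrase faiblesse (ScoreTotal phrase faiblesse)

-- ===== LEMMAS AND PROOFS =====

-- A's inner loop adds 2 per occurrence of elem in faiblesse
theorem inner_fold_eq (elem : String) (fs : List String) (acc : Int) :
    fs.foldl (fun p faib => if faib == elem then p + 2 else p) acc
      = acc + 2 * (fs.count elem : Int) := by
  induction fs generalizing acc with
  | nil => simp
  | cons f fs ih =>
    simp only [List.foldl_cons, ih, List.count_cons]
    by_cases h : elem = f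
    · subst h
      simp only [BEq.rfl, if_true]
      push_cast; ring
    · have h1 : (f == elem) = false := by
        simp only [beq_eq_false_iff_ne, ne_eq]; exact fun e => h e.symm
      have h2 : (elem == f) = false := by
        simp only [beq_eq_false_iff_ne, ne_eq]; exact h
      simp [h1]

-- A's outer loop: 3 per element plus 2 per matching occurrence
theorem outer_fold_eq (fs : List String) (ps : List String) (acc : Int) :
    ps.foldl (fun point elem =>
      fs.foldl (fun p faib => if faib == elem then p + 2 else p) (point + 3)) acc
      = acc + 3 * (ps.length : Int)
          + ((ps.map (fun e => 2 * (fs.count e : Int)))).sum := by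
  induction ps generalizing acc with
  | nil => simp
  | cons e ps ih =>
    rw [List.foldl_cons, ih, inner_fold_eq]
    simp only [List.map_cons, List.sum_cons, List.length_cons]
    push_cast; ring

theorem drop_len_takeWhile (p : String → Bool) (r : List String) :
    r.drop (r.takeWhile p).length = r.dropWhile p := by
  induction r with
  | nil => rfl
  | cons y rs ih =>
    by_cases h : p y
    · simp [h, ih]
    · simp [h]

-- run-weighted sum equals plain sum over the list (no sortedness needed)
theorem runs_weighted_sum (h : String → Int) (l : List String) :
    ((pvRuns l).map (fun q => q.2 * h q.1)).sum = (l.map h).sum := by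
  induction l using pvRuns.induct with
  | case1 => simp [pvRuns]
  | case2 x r k ih =>
    rw [pvRuns]
    simp only [List.map_cons, List.sum_cons]
    have hsplit : r = r.takeWhile (fun y => y == x) ++ r.drop k :=
      (by rw [show k = (r.takeWhile (fun y => y == x)).length from rfl,
              drop_len_takeWhile, List.takeWhile_append_dropWhile])
    have htw : ∀ z ∈ r.takeWhile (fun y => y == x), z = x := by
      intro z hz
      have := List.mem_takeWhile_imp hz
      simpa using this
    have hsum : ((r.takeWhile (fun y => y == x)).map h).sum = (k : Int) * h x := by
      have : ∀ (t : List String), (∀ z ∈ t, z = x) → (t.map h).sum = (t.length : Int) * h x := by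
        intro t
        induction t with
        | nil => simp
        | cons z zs ihz =>
          intro hall
          have hz : z = x := hall z (by simp)
          have hzs : (zs.map h).sum = (zs.length : Int) * h x := ihz (fun w hw => hall w (by simp [hw]))
          rw [List.map_cons, List.sum_cons, hz, hzs, List.length_cons]
          push_cast; ring
      exact this _ htw
    calc ((k : Int) + 1) * h x + ((pvRuns (r.drop k)).map (fun q => q.2 * h q.1)).sum
        = ((k : Int) + 1) * h x + ((r.drop k).map h).sum := by rw [ih]
      _ = h x + (((r.takeWhile (fun y => y == x)).map h).sum + ((r.drop k).map h).sum) := by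
            rw [hsum]; ring
      _ = h x + (r.map h).sum := by
            conv_rhs => rw [hsplit]
            rw [List.map_append, List.sum_append]
      _ = ((x :: r).map h).sum := by simp

-- multiplicity of v recorded in the runs (keySum) equals the plain count
def pvKeySum (rf : List (String × Int)) (v : String) : Int :=
  (rf.map (fun q => if q.1 = v then q.2 else 0)).sum

theorem sum_indicator_count (v : String) (l : List String) :
    (l.map (fun e => if e = v then (1 : Int) else 0)).sum = (l.count v : Int) := by
  induction l with
  | nil => simp
  | cons z zs ih =>
    simp only [List.map_cons, List.sum_cons, ih]
    by_cases h : z = v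
    · subst h
      simp
      ring
    · simp [h]

theorem keySum_runs_eq_count (l : List String) (v : String) :
    pvKeySum (pvRuns l) v = (l.count v : Int) := by
  unfold pvKeySum
  have := runs_weighted_sum (fun e => if e = v then (1 : Int) else 0) l
  have hl : ((pvRuns l).map (fun q => q.2 * if q.1 = v then (1 : Int) else 0)).sum
      = ((pvRuns l).map (fun q => if q.1 = v then q.2 else 0)).sum := by
    congr 1
    apply List.map_congr_left
    intro q _
    by_cases h : q.1 = v <;> simp [h]
  rw [hl] at this
  rw [this, sum_indicator_count]

theorem keySum_eq_zero (rf : List (String × Int)) (v : String)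
    (hne : ∀ q ∈ rf, q.1 ≠ v) : pvKeySum rf v = 0 := by
  unfold pvKeySum
  induction rf with
  | nil => simp
  | cons q qs ih =>
    simp only [List.map_cons, List.sum_cons]
    rw [if_neg (hne q (by simp)), ih (fun w hw => hne w (by simp [hw]))]
    simp

-- every key produced by pvRuns is an element of the list
theorem runs_key_mem (l : List String) : ∀ q ∈ pvRuns l, q.1 ∈ l := by
  induction l using pvRuns.induct with
  | case1 => simp [pvRuns]
  | case2 x r k ih =>
    rw [pvRuns]
    intro q hq
    rcases List.mem_cons.mp hq with h | h
    · subst h; simp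
    · exact List.mem_cons_of_mem _ (List.drop_subset _ _ (ih q h))

-- everything past the leading run of x is strictly greater (sorted input)
theorem drop_run_gt (x : String) (r : List String)
    (hs : (x :: r).Pairwise (· ≤ ·)) :
    ∀ z ∈ r.drop (r.takeWhile (fun y => y == x)).length, x < z := by
  rw [drop_len_takeWhile]
  induction r with
  | nil => simp
  | cons y rs ih =>
    rcases List.pairwise_cons.mp hs with ⟨hx, hyr⟩
    by_cases h : y = x
    · subst h
      rw [List.dropWhile_cons_of_pos (by simp)]
      apply ih
      exact List.pairwise_cons.mpr ⟨fun z hz => hx z (by simp [hz]),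
        (List.pairwise_cons.mp hyr).2⟩
    · rw [List.dropWhile_cons_of_neg (by simpa using h)]
      intro z hz
      have hxy : x < y := lt_of_le_of_ne (hx y (by simp)) (fun e => h e.symm)
      rcases List.mem_cons.mp hz with rfl | hz'
      · exact hxy
      · exact lt_of_lt_of_le hxy ((List.pairwise_cons.mp hyr).1 z hz')

-- on a sorted list the run keys are strictly increasing
theorem runs_keys_sorted (l : List String) (hs : l.Pairwise (· ≤ ·)) :
    (pvRuns l).Pairwise (fun q q' => q.1 < q'.1) := by
  induction l using pvRuns.induct with
  | case1 => simp [pvRuns]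
  | case2 x r k ih =>
    rw [pvRuns]
    rcases List.pairwise_cons.mp hs with ⟨_, hr⟩
    have hdrop : (r.drop k).Pairwise (· ≤ ·) := hr.sublist (List.drop_sublist _ _)
    refine List.pairwise_cons.mpr ⟨?_, ih hdrop⟩
    intro q hq
    exact drop_run_gt x r hs q.1 (runs_key_mem _ q hq)

-- the merge loop computes the dot product of the two run lists
theorem merge_eq_dot (rp rf : List (String × Int))
    (hp : rp.Pairwise (fun q q' => q.1 < q'.1))
    (hf : rf.Pairwise (fun q q' => q.1 < q'.1)) :
    pvMerge rp rf = (rp.map (fun q => q.2 * pvKeySum rf q.1)).sum := by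
  induction rp, rf using pvMerge.induct with
  | case1 rf => simp [pvMerge]
  | case2 q qs =>
    rw [pvMerge]
    have : ∀ q' ∈ (q :: qs), pvKeySum ([] : List (String × Int)) q'.1 = 0 := by
      intro q' _; simp [pvKeySum]
    rw [List.map_congr_left (fun a ha => by rw [this a ha, mul_zero])]
    simp
  | case3 p a ps f b fs hlt ih =>
    rw [pvMerge, if_pos hlt]
    rcases List.pairwise_cons.mp hp with ⟨hpall, hps⟩
    rw [ih hps hf]
    have hz : pvKeySum ((f, b) :: fs) p = 0 := by
      apply keySum_eq_zero
      intro q hq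
      rcases List.mem_cons.mp hq with rfl | hq'
      · exact hlt.ne'
      · have : f < q.1 := (List.pairwise_cons.mp hf).1 q hq'
        exact (lt_trans hlt this).ne'
    simp [List.map_cons, hz]
  | case4 p a ps f b fs hnlt hlt ih =>
    rw [pvMerge, if_neg hnlt, if_pos hlt]
    rcases List.pairwise_cons.mp hf with ⟨_, hfs⟩
    rw [ih hp hfs]
    congr 1
    apply List.map_congr_left
    intro q hq
    have hfq : f < q.1 := by
      rcases List.mem_cons.mp hq with rfl | hq'
      · exact hlt
      · exact lt_trans hlt ((List.pairwise_cons.mp hp).1 q hq')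
    unfold pvKeySum
    simp only [List.map_cons, List.sum_cons]
    rw [if_neg hfq.ne]
    simp
  | case5 p a ps f b fs hnlt hnlt' ih =>
    rw [pvMerge, if_neg hnlt, if_neg hnlt']
    have heq : p = f := le_antisymm (not_lt.mp hnlt') (not_lt.mp hnlt)
    rcases List.pairwise_cons.mp hp with ⟨hpall, hps⟩
    rcases List.pairwise_cons.mp hf with ⟨hfall, hfs⟩
    rw [ih hps hfs]
    have hsum : pvKeySum ((f, b) :: fs) p = b := by
      unfold pvKeySum
      simp only [List.map_cons, List.sum_cons]
      rw [if_pos heq.symm]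
      have : pvKeySum fs p = 0 := by
        apply keySum_eq_zero
        intro q hq
        have hfq : f < q.1 := hfall q hq
        exact (lt_of_le_of_lt (le_of_eq heq) hfq).ne'
      unfold pvKeySum at this
      rw [this]; simp
    have htail : (ps.map (fun q => q.2 * pvKeySum ((f, b) :: fs) q.1)).sum
        = (ps.map (fun q => q.2 * pvKeySum fs q.1)).sum := by
      apply congrArg
      apply List.map_congr_left
      intro q hq
      have hfq : f < q.1 := heq ▸ hpall q hq
      unfold pvKeySum
      simp only [List.map_cons, List.sum_cons]
      rw [if_neg hfq.ne]
      simp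
    simp only [List.map_cons, List.sum_cons, hsum, htail]

-- ===== VERDICT (by name: the statement is the Claim_ definition above) =====
theorem ScoreTotal_spec : Claim_equal_ScoreTotal := by
  intro phrase faiblesse _
  unfold Spec_ScoreTotal ScoreTotal ScoreTotal_alt
  rw [outer_fold_eq]
  have hsp : (PySem.List.sorted phrase (fun x => x) false).Pairwise (· ≤ ·) := by
    simpa using PySem.List.sorted_pairwise phrase (fun x => x)
  have hsf : (PySem.List.sorted faiblesse (fun x => x) false).Pairwise (· ≤ ·) := by
    simpa using PySem.List.sorted_pairwise faiblesse (fun x => x)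
  rw [merge_eq_dot _ _ (runs_keys_sorted _ hsp) (runs_keys_sorted _ hsf)]
  have hcount : ∀ q : String × Int,
      pvKeySum (pvRuns (PySem.List.sorted faiblesse (fun x => x) false)) q.1
        = (faiblesse.count q.1 : Int) := by
    intro q
    rw [keySum_runs_eq_count]
    congr 1
    exact (PySem.List.sorted_perm faiblesse (fun x => x) false).count_eq q.1
  have hperm := (PySem.List.sorted_perm phrase (fun x => x) false).map
      (fun e => (faiblesse.count e : Int))
  have hR : ((pvRuns (PySem.List.sorted phrase (fun x => x) false)).map
        (fun q => q.2 * pvKeySum (pvRuns (PySem.List.sorted faiblesse (fun x => x) false)) q.1)).sum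
      = (phrase.map (fun e => (faiblesse.count e : Int))).sum := by
    rw [List.map_congr_left (fun q _ => by rw [hcount q]),
        runs_weighted_sum (fun e => (faiblesse.count e : Int)), hperm.sum_eq]
  rw [hR]
  rw [List.sum_map_mul_left phrase (fun e => (faiblesse.count e : Int)) 2]; ring
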